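-- pv_equiv track=rewrite | github.com/lucasXiaofan/cs520_exercise2 | exercise1_multi_solution_variants/problem_8.py | maxValueAfterReverse_gemini_self_planning
-- ===== SOURCE A (Python) =====
-- from typing import List
--
-- def maxValueAfterReverse_gemini_self_planning(nums: List[int]) -> int:
--     n = len(nums)
--     initial_value = 0
--     for i in range(n - 1):
--         initial_value += abs(nums[i] - nums[i + 1])
--
--     max_value = initial_value
--
--     for i in range(n):
--         for j in range(i, n):
--             new_value = 0
--
--             # Calculate value before reversed subarray
--             for k in range(0, i - 1):
--                 new_value += abs(nums[k] - nums[k + 1])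
--
--             # Calculate value within reversed subarray
--             reversed_subarray = nums[i:j+1]
--             reversed_subarray.reverse()
--
--             if i > 0:
--                 new_value += abs(nums[i-1] - reversed_subarray[0])
--
--             for k in range(len(reversed_subarray) - 1):
--                 new_value += abs(reversed_subarray[k] - reversed_subarray[k+1])
--
--             # Calculate value after reversed subarray
--             if j < n - 1:
--                 new_value += abs(reversed_subarray[-1] - nums[j+1])
--
--             for k in range(j + 1, n - 1):
--                 new_value += abs(nums[k] - nums[k + 1])
--
--             max_value = max(max_value, new_value)
--
--     return max_value
-- ===== SOURCE B (Python) =====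
-- from typing import List
--
-- def maxValueAfterReverse_gemini_self_planning(nums: List[int]) -> int:
--     n = len(nums)
--     total = 0
--     for k in range(n - 1):
--         total += abs(nums[k] - nums[k + 1])
--     best = total
--     for i in range(n):
--         for j in range(i, n):
--             delta = 0
--             if i > 0:
--                 delta += abs(nums[i - 1] - nums[j]) - abs(nums[i - 1] - nums[i])
--             if j < n - 1:
--                 delta += abs(nums[i] - nums[j + 1]) - abs(nums[j] - nums[j + 1])
--             best = max(best, total + delta)
--     return best
-- ===== Notes on version B (the rewrite author's own statement) =====
-- stated objective: faster
-- what changed: B precomputes the total adjacent-difference sum once and, for each (i,j), adds an O(1) two-boundary delta instead of A's O(n) rebuild of the reversed subarray and full re-summation, dropping the complexity from O(n^3) to O(n^2).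
import Mathlib
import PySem

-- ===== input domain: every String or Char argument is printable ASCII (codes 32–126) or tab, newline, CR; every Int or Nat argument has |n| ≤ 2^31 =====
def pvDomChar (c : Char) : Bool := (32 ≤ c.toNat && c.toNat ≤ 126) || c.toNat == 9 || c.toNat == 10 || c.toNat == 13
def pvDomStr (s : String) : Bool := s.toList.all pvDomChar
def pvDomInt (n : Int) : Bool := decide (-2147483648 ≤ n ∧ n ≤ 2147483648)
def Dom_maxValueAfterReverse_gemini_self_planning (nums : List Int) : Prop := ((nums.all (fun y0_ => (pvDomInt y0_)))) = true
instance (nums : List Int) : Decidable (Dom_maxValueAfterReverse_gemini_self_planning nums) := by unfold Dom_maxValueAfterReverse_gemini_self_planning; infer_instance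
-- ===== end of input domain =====

-- B replaces A's O(n) per-pair rebuild-and-resum of the whole array with an O(1) boundary
-- delta added to the precomputed total, removing every inner scan (objective: faster).

-- ===== PORT A =====
-- (all pyGetD defaults are unreachable: every index A forms is in range)
def maxValueAfterReverse_gemini_self_planning (nums : List Int) : Int :=
  let n : Int := nums.length
  let initial := (PySem.List.pyRange 0 (n - 1) 1).foldl
      (fun acc k => acc + |PySem.List.pyGetD nums k 0 - PySem.List.pyGetD nums (k + 1) 0|) 0
  (PySem.List.pyRange 0 n 1).foldl (fun mv i =>
    (PySem.List.pyRange i n 1).foldl (fun mv j =>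
      let nv0 := (PySem.List.pyRange 0 (i - 1) 1).foldl
          (fun acc k => acc + |PySem.List.pyGetD nums k 0 - PySem.List.pyGetD nums (k + 1) 0|) 0
      let rev := (PySem.List.slice nums (some i) (some (j + 1))).reverse
      let nv1 := if i > 0 then nv0 + |PySem.List.pyGetD nums (i - 1) 0 - PySem.List.pyGetD rev 0 0| else nv0
      let nv2 := (PySem.List.pyRange 0 ((rev.length : Int) - 1) 1).foldl
          (fun acc k => acc + |PySem.List.pyGetD rev k 0 - PySem.List.pyGetD rev (k + 1) 0|) nv1
      let nv3 := if j < n - 1 then nv2 + |PySem.List.pyGetD rev (-1) 0 - PySem.List.pyGetD nums (j + 1) 0| else nv2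
      let nv4 := (PySem.List.pyRange (j + 1) (n - 1) 1).foldl
          (fun acc k => acc + |PySem.List.pyGetD nums k 0 - PySem.List.pyGetD nums (k + 1) 0|) nv3
      max mv nv4) mv) initial

-- ===== PORT B =====
def maxValueAfterReverse_gemini_self_planning_alt (nums : List Int) : Int :=
  let n : Int := nums.length
  let total := (PySem.List.pyRange 0 (n - 1) 1).foldl
      (fun acc k => acc + |PySem.List.pyGetD nums k 0 - PySem.List.pyGetD nums (k + 1) 0|) 0
  (PySem.List.pyRange 0 n 1).foldl (fun best i =>
    (PySem.List.pyRange i n 1).foldl (fun best j =>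
      let d0 : Int := 0
      let d1 := if i > 0 then
          d0 + |PySem.List.pyGetD nums (i - 1) 0 - PySem.List.pyGetD nums j 0|
             - |PySem.List.pyGetD nums (i - 1) 0 - PySem.List.pyGetD nums i 0| else d0
      let d2 := if j < n - 1 then
          d1 + |PySem.List.pyGetD nums i 0 - PySem.List.pyGetD nums (j + 1) 0|
             - |PySem.List.pyGetD nums j 0 - PySem.List.pyGetD nums (j + 1) 0| else d1
      max best (total + d2)) best) total

-- ===== PRECONDITION & SPEC =====
def Spec_maxValueAfterReverse_gemini_self_planning (nums : List Int) (out : Int) : Prop := out = maxValueAfterReverse_gemini_self_planning_alt nums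
instance (nums : List Int) (out : Int) : Decidable (Spec_maxValueAfterReverse_gemini_self_planning nums out) := by unfold Spec_maxValueAfterReverse_gemini_self_planning; infer_instance

-- ===== CLAIM (what is proved, stated in full; the proofs are below) =====
def Claim_equal_maxValueAfterReverse_gemini_self_planning : Prop := ∀ (nums : List Int), Dom_maxValueAfterReverse_gemini_self_planning nums → Spec_maxValueAfterReverse_gemini_self_planning nums (maxValueAfterReverse_gemini_self_planning nums)

-- ===== LEMMAS AND PROOFS =====

def pvAdj : List Int → Int
  | [] => 0
  | [_] => 0
  | a :: b :: t => |a - b| + pvAdj (b :: t)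

def pvJoint (l m : List Int) : Int :=
  match l.getLast?, m.head? with
  | some x, some y => |x - y|
  | _, _ => 0

lemma pvAdj_short (l : List Int) (h : l.length <= 1) : pvAdj l = 0 := by
  match l, h with
  | [], _ => rfl
  | [_], _ => rfl

lemma pvAdj_cons (a : Int) (t : List Int) : pvAdj (a :: t) = pvJoint [a] t + pvAdj t := by
  cases t <;> simp [pvAdj, pvJoint]

lemma pvAdj_append (l m : List Int) :
    pvAdj (l ++ m) = pvAdj l + pvJoint l m + pvAdj m := by
  induction l with
  | nil => simp [pvAdj, pvJoint]
  | cons a l ih =>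
    rw [List.cons_append, pvAdj_cons, ih, pvAdj_cons a l]
    cases l with
    | nil => cases m <;> simp [pvJoint, pvAdj]
    | cons b l' =>
      have h1 : pvJoint [a] ((b :: l') ++ m) = pvJoint [a] (b :: l') := by
        simp [pvJoint]
      have h2 : pvJoint (a :: b :: l') m = pvJoint (b :: l') m := by
        simp [pvJoint, List.getLast?_cons_cons]
      rw [h1, h2]; ring

lemma pvAdj_reverse (l : List Int) : pvAdj l.reverse = pvAdj l := by
  induction l with
  | nil => rfl
  | cons a l ih =>
    rw [List.reverse_cons, pvAdj_append, ih, pvAdj_cons]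
    have : pvJoint l.reverse [a] = pvJoint [a] l := by
      cases h : l.head? with
      | none => cases l with
        | nil => simp [pvJoint]
        | cons b t => simp at h
      | some x =>
        have hl : l ≠ [] := by cases l <;> simp_all
        simp [pvJoint, List.getLast?_reverse, h, abs_sub_comm]
    rw [this, pvAdj_cons a l]
    simp [pvJoint, pvAdj]
    ring

def pvT (xs : List Int) (k : Int) : Int :=
  |PySem.List.pyGetD xs k 0 - PySem.List.pyGetD xs (k + 1) 0|
def pvS (xs : List Int) (a b : Int) : Int :=
  ((PySem.List.pyRange a b 1).map (pvT xs)).sum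

lemma pvFoldl_T (xs : List Int) (a b c : Int) :
    (PySem.List.pyRange a b 1).foldl
      (fun acc k => acc + |PySem.List.pyGetD xs k 0 - PySem.List.pyGetD xs (k + 1) 0|) c
    = c + pvS xs a b := by
  simpa [pvS, pvT] using
    PySem.List.foldl_add (PySem.List.pyRange a b 1) (pvT xs) c

lemma pvT_natCast (xs : List Int) (k : Nat) (h : k + 1 < xs.length) :
    pvT xs (k : Int) = |xs[k] - xs[k + 1]| := by
  have h1 : ((k : Int)) + 1 = ((k + 1 : Nat) : Int) := by push_cast; ring
  rw [pvT, h1]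
  rw [PySem.List.pyGetD_natCast, PySem.List.pyGetD_natCast]
  rw [List.getD_eq_getElem _ _ (by omega), List.getD_eq_getElem _ _ h]

lemma pvS_eq_pvAdj (xs : List Int) (a b : Nat) (hb : b < xs.length) :
    pvS xs (a : Int) (b : Int) = pvAdj ((xs.drop a).take (b + 1 - a)) := by
  induction b with
  | zero =>
    have h1 : pvS xs (a : Int) ((0:Nat) : Int) = 0 := by
      rw [pvS, PySem.List.pyRange_one_eq_nil (by exact_mod_cast Nat.zero_le a)]; rfl
    rw [h1, pvAdj_short]
    exact le_trans (List.length_take_le _ _) (by omega)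
  | succ b ih =>
    by_cases hab : a ≤ b
    · have hcast : ((b + 1 : Nat) : Int) = (b : Int) + 1 := by push_cast; ring
      have hsplit := PySem.List.pyRange_one_succ_right (a := (a : Int)) (b := (b : Int))
        (by exact_mod_cast hab)
      rw [pvS, hcast, hsplit, List.map_append, List.sum_append]
      have ihh : pvS xs a b = pvAdj ((xs.drop a).take (b + 1 - a)) := ih (by omega)
      rw [show (((PySem.List.pyRange (a:Int) (b:Int) 1).map (pvT xs)).sum) = pvS xs a b from rfl, ihh]
      -- RHS decomposition
      have hL : ((xs.drop a).take (b + 1 - a)).length = b + 1 - a := by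
        simp [List.length_take, List.length_drop]; omega
      have htake : (xs.drop a).take (b + 1 + 1 - a)
          = (xs.drop a).take (b + 1 - a) ++ [xs[b + 1]] := by
        have h2 : b + 1 + 1 - a = (b + 1 - a) + 1 := by omega
        rw [h2, List.take_add_one]
        have h3 : (xs.drop a)[b + 1 - a]? = some xs[b + 1] := by
          rw [List.getElem?_drop]
          rw [show a + (b + 1 - a) = b + 1 by omega]
          exact List.getElem?_eq_getElem hb
        rw [h3]; rfl
      rw [htake, pvAdj_append]
      have hjoint : pvJoint ((xs.drop a).take (b + 1 - a)) [xs[b + 1]] = |xs[b] - xs[b + 1]| := by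
        have hlast : ((xs.drop a).take (b + 1 - a)).getLast? = some xs[b] := by
          rw [List.getLast?_eq_getElem?, hL]
          rw [show b + 1 - a - 1 = b - a by omega]
          rw [List.getElem?_take_of_lt (by omega), List.getElem?_drop]
          rw [show a + (b - a) = b by omega]
          exact List.getElem?_eq_getElem (by omega)
        rw [pvJoint, hlast]; rfl
      rw [hjoint]
      simp only [List.map_cons, List.map_nil, List.sum_cons, List.sum_nil, add_zero]
      rw [pvT_natCast xs b hb, pvAdj_short [xs[b+1]] (by simp)]
      ring
    · have hle : ((b + 1 : Nat) : Int) ≤ ((a : Nat) : Int) := by exact_mod_cast (by omega : b + 1 ≤ a)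
      have h0 : pvS xs (a : Int) ((b + 1 : Nat) : Int) = 0 := by
        rw [pvS, PySem.List.pyRange_one_eq_nil hle]; rfl
      rw [h0, pvAdj_short]
      exact le_trans (List.length_take_le _ _) (by omega)


-- ===== VERDICT (by name: the statement is the Claim_ definition above) =====
theorem maxValueAfterReverse_gemini_self_planning_spec : Claim_equal_maxValueAfterReverse_gemini_self_planning := by
  intro nums _
  unfold Spec_maxValueAfterReverse_gemini_self_planning
  unfold maxValueAfterReverse_gemini_self_planning maxValueAfterReverse_gemini_self_planning_alt
  dsimp only
  rw [pvFoldl_T]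
  apply PySem.List.foldl_congr_mem'
  intro i hi mv
  apply PySem.List.foldl_congr_mem'
  intro j hj acc
  rw [pvFoldl_T, pvFoldl_T, pvFoldl_T]
  congr 1
  -- bounds from the range memberships
  rw [PySem.List.mem_pyRange_one] at hi hj
  obtain ⟨hi0, hin⟩ := hi
  obtain ⟨hij, hjn⟩ := hj
  obtain ⟨ii, rfl⟩ := Int.eq_ofNat_of_zero_le hi0
  obtain ⟨jj, rfl⟩ := Int.eq_ofNat_of_zero_le (le_trans hi0 hij)
  have hiijj : ii ≤ jj := by exact_mod_cast hij
  have hjlen : jj < nums.length := by exact_mod_cast hjn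
  -- the reversed block
  set mid := (nums.drop ii).take (jj + 1 - ii) with hmid
  have hslice : PySem.List.slice nums (some (ii : Int)) (some ((jj : Int) + 1)) = mid := by
    rw [show ((jj : Int) + 1) = ((jj + 1 : Nat) : Int) by push_cast; ring,
        PySem.List.slice_natCast]
  have hmidlen : mid.length = jj + 1 - ii := by
    rw [hmid]; simp [List.length_take, List.length_drop]; omega
  have hmidne : mid ≠ [] := by
    intro h; rw [h] at hmidlen; simp at hmidlen; omega
  have hmid0 : mid.head? = some nums[ii] := by
    rw [List.head?_eq_getElem?, hmid, List.getElem?_take_of_lt (by omega), List.getElem?_drop,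
        Nat.add_zero]
    exact List.getElem?_eq_getElem (by omega)
  have hmidlast : mid.getLast? = some nums[jj] := by
    rw [List.getLast?_eq_getElem?, hmidlen, hmid, show jj + 1 - ii - 1 = jj - ii by omega,
        List.getElem?_take_of_lt (by omega), List.getElem?_drop,
        show ii + (jj - ii) = jj by omega]
    exact List.getElem?_eq_getElem hjlen
  have hrevne : mid.reverse ≠ [] := by simpa using hmidne
  have hrev0 : PySem.List.pyGetD mid.reverse 0 0 = nums[jj] := by
    rw [PySem.List.pyGetD_zero, List.getD_eq_getElem?_getD, ← List.head?_eq_getElem?,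
        List.head?_reverse, hmidlast]; rfl
  have hrevlast : PySem.List.pyGetD mid.reverse (-1) 0 = nums[ii] := by
    rw [PySem.List.pyGetD_neg_one _ _ hrevne]
    have h1 : mid.reverse.getLast? = some nums[ii] := by
      rw [List.getLast?_reverse, hmid0]
    rwa [List.getLast?_eq_some_getLast (h := hrevne), Option.some.injEq] at h1
  have hrevS : pvS mid.reverse 0 ((mid.reverse.length : Int) - 1) = pvAdj mid := by
    have hL : mid.reverse.length = jj + 1 - ii := by simp [hmidlen]
    have h1 : ((mid.reverse.length : Int) - 1) = ((jj - ii : Nat) : Int) := by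
      rw [hL]; omega
    rw [h1, show (0 : Int) = ((0 : Nat) : Int) from rfl,
        pvS_eq_pvAdj _ _ _ (by omega)]
    rw [List.drop_zero, List.take_of_length_le (by omega), pvAdj_reverse]
  have hpre : pvS nums 0 ((ii : Int) - 1) = pvAdj (nums.take ii) := by
    by_cases hii : ii = 0
    · subst hii
      rw [pvS, PySem.List.pyRange_one_eq_nil (by norm_num)]
      simp [pvAdj]
    · rw [show ((ii : Int) - 1) = ((ii - 1 : Nat) : Int) by omega,
          show (0 : Int) = ((0 : Nat) : Int) from rfl,
          pvS_eq_pvAdj _ _ _ (by omega), List.drop_zero,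
          show ii - 1 + 1 - 0 = ii by omega]
  have hsuf : pvS nums ((jj : Int) + 1) ((nums.length : Int) - 1)
      = pvAdj (nums.drop (jj + 1)) := by
    rw [show ((jj : Int) + 1) = ((jj + 1 : Nat) : Int) by push_cast; ring,
        show ((nums.length : Int) - 1) = ((nums.length - 1 : Nat) : Int) by omega,
        pvS_eq_pvAdj _ _ _ (by omega),
        List.take_of_length_le (by simp [List.length_drop]; omega)]
  have htot : pvS nums 0 ((nums.length : Int) - 1) = pvAdj nums := by
    rw [show ((nums.length : Int) - 1) = ((nums.length - 1 : Nat) : Int) by omega,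
        show (0 : Int) = ((0 : Nat) : Int) from rfl,
        pvS_eq_pvAdj _ _ _ (by omega), List.drop_zero,
        List.take_of_length_le (by omega)]
  -- splitting nums around the block
  have hdecomp : pvAdj nums = pvAdj (nums.take ii) + pvJoint (nums.take ii) mid + pvAdj mid
      + pvJoint mid (nums.drop (jj + 1)) + pvAdj (nums.drop (jj + 1)) := by
    have hsplit : nums = nums.take ii ++ (mid ++ nums.drop (jj + 1)) := by
      have h1 : mid ++ nums.drop (jj + 1) = nums.drop ii := by
        have h2 : nums.drop (jj + 1) = (nums.drop ii).drop (jj + 1 - ii) := by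
          rw [List.drop_drop, show ii + (jj + 1 - ii) = jj + 1 by omega]
        rw [hmid, h2]
        exact List.take_append_drop _ _
      rw [h1, List.take_append_drop]
    have hjoin : pvJoint (nums.take ii) (mid ++ nums.drop (jj + 1))
        = pvJoint (nums.take ii) mid := by
      unfold pvJoint
      rw [List.head?_append_of_ne_nil _ hmidne]
    conv_lhs => rw [hsplit]
    rw [pvAdj_append, pvAdj_append, hjoin]; ring
  rw [hslice, hrev0, hrevlast, hrevS, hpre, hsuf, htot, hdecomp]
  have hiin : ii < nums.length := by exact_mod_cast hin
  have hgi : PySem.List.pyGetD nums ((ii : Nat) : Int) 0 = nums[ii] := by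
    rw [PySem.List.pyGetD_natCast, List.getD_eq_getElem _ _ hiin]
  have hgj : PySem.List.pyGetD nums ((jj : Nat) : Int) 0 = nums[jj] := by
    rw [PySem.List.pyGetD_natCast, List.getD_eq_getElem _ _ hjlen]
  rw [hgi, hgj]
  by_cases hc2 : (jj : Int) < (nums.length : Int) - 1
  · have hjj1 : jj + 1 < nums.length := by omega
    rw [if_pos hc2, if_pos hc2]
    have hgj1 : PySem.List.pyGetD nums ((jj : Int) + 1) 0 = nums[jj + 1] := by
      rw [show ((jj : Int) + 1) = ((jj + 1 : Nat) : Int) by push_cast; ring,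
          PySem.List.pyGetD_natCast, List.getD_eq_getElem _ _ hjj1]
    have hjoint2 : pvJoint mid (nums.drop (jj + 1)) = |nums[jj] - nums[jj + 1]| := by
      unfold pvJoint
      have hhd : (nums.drop (jj + 1)).head? = some nums[jj + 1] := by
        rw [List.head?_eq_getElem?, List.getElem?_drop]
        simp
      rw [hmidlast, hhd]
    rw [hgj1, hjoint2]
    by_cases hc1 : (ii : Int) > 0
    · rw [if_pos hc1, if_pos hc1]
      have hii1 : 1 ≤ ii := by omega
      have hgi1 : PySem.List.pyGetD nums ((ii : Int) - 1) 0 = nums[ii - 1] := by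
        rw [show ((ii : Int) - 1) = ((ii - 1 : Nat) : Int) by omega,
            PySem.List.pyGetD_natCast, List.getD_eq_getElem _ _ (by omega)]
      have hjoint1 : pvJoint (nums.take ii) mid = |nums[ii - 1] - nums[ii]| := by
        unfold pvJoint
        have hlast : (nums.take ii).getLast? = some nums[ii - 1] := by
          rw [List.getLast?_eq_getElem?, List.length_take,
              show min ii nums.length = ii by omega,
              List.getElem?_take_of_lt (by omega)]
          exact List.getElem?_eq_getElem (by omega)
        rw [hlast, hmid0]
      rw [hgi1, hjoint1]
      ring
    · rw [if_neg hc1, if_neg hc1]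
      have hii0 : ii = 0 := by omega
      have hjoint1 : pvJoint (nums.take ii) mid = 0 := by
        subst hii0; simp [pvJoint]
      rw [hjoint1]
      ring
  · rw [if_neg hc2, if_neg hc2]
    have hdropnil : nums.drop (jj + 1) = [] := List.drop_eq_nil_of_le (by omega)
    have hjoint2 : pvJoint mid (nums.drop (jj + 1)) = 0 := by
      rw [hdropnil]; unfold pvJoint; rw [hmidlast]; rfl
    rw [hjoint2]
    by_cases hc1 : (ii : Int) > 0
    · rw [if_pos hc1, if_pos hc1]
      have hii1 : 1 ≤ ii := by omega
      have hgi1 : PySem.List.pyGetD nums ((ii : Int) - 1) 0 = nums[ii - 1] := by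
        rw [show ((ii : Int) - 1) = ((ii - 1 : Nat) : Int) by omega,
            PySem.List.pyGetD_natCast, List.getD_eq_getElem _ _ (by omega)]
      have hjoint1 : pvJoint (nums.take ii) mid = |nums[ii - 1] - nums[ii]| := by
        unfold pvJoint
        have hlast : (nums.take ii).getLast? = some nums[ii - 1] := by
          rw [List.getLast?_eq_getElem?, List.length_take,
              show min ii nums.length = ii by omega,
              List.getElem?_take_of_lt (by omega)]
          exact List.getElem?_eq_getElem (by omega)
        rw [hlast, hmid0]
      rw [hgi1, hjoint1]
      ring
    · rw [if_neg hc1, if_neg hc1]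
      have hii0 : ii = 0 := by omega
      have hjoint1 : pvJoint (nums.take ii) mid = 0 := by
        subst hii0; simp [pvJoint]
      rw [hjoint1]
      ring
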